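-- pv_equiv track=rewrite | github.com/samarth8392/hybrid_genomics | scripts/hybrid_index/calculate_hybrid_index.py | calculate_hybrid_index
-- ===== SOURCE A (Python) =====
-- def calculate_hybrid_index(genotype, ref, alt, parent2_allele):
--     """
--     Calculate contribution of parent2 alleles for a single genotype.
--
--     Returns: (parent2_count, total_alleles)
--     """
--     if genotype.startswith('.'):
--         return 0, 0
--
--     # Parse genotype
--     alleles = genotype.replace('|', '/').split('/')
--
--     p2_count = 0
--     total = 0
--
--     for allele_idx in alleles:
--         if allele_idx == '.':
--             continue
--
--         total += 1
--
--         if allele_idx == '0':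
--             observed_allele = ref
--         elif allele_idx == '1':
--             observed_allele = alt.split(',')[0]  # Handle multi-allelic
--         else:
--             continue
--
--         if observed_allele == parent2_allele:
--             p2_count += 1
--
--     return p2_count, total
-- ===== SOURCE B (Python) =====
-- def calculate_hybrid_index(genotype, ref, alt, parent2_allele):
--     """
--     Calculate contribution of parent2 alleles for a single genotype.
--
--     Returns: (parent2_count, total_alleles)
--     """
--     if genotype.startswith('.'):
--         return 0, 0
--
--     alleles = genotype.replace('|', '/').split('/')
--
--     total = len(alleles) - alleles.count('.')
--     p2_count = (alleles.count('0') * (ref == parent2_allele)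
--                 + alleles.count('1') * (alt.split(',')[0] == parent2_allele))
--
--     return p2_count, total
-- ===== Notes on version B (the rewrite author's own statement) =====
-- stated objective: simpler
-- what changed: The per-allele branch/continue loop is removed entirely: B tabulates allele counts with list.count and computes both components by closed-form arithmetic (total = len - count('.'), p2 = count('0')*[ref match] + count('1')*[alt match]).
import Mathlib
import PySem

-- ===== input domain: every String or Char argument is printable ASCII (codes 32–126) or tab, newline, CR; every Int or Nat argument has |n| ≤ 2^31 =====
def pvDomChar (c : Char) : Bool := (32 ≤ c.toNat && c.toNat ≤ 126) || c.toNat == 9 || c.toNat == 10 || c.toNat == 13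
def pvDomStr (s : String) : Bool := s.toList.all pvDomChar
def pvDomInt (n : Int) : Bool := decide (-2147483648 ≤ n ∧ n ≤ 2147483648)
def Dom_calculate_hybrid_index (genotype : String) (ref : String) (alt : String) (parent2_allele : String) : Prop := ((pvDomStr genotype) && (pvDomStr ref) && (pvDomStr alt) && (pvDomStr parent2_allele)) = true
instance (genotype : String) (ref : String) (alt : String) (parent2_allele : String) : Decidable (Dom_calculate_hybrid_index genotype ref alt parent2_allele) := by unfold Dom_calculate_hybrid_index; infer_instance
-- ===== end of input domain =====

-- B removes the per-allele branch/continue loop: it tabulates allele counts and computes both results by closed-form arithmetic (objective: simpler).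
-- ===== PORT A =====
-- the loop body of A, one step per allele (continue = return the state unchanged)
def chiStep (ref p2a : String) (obs1 : List Char) (st : Int × Int) (allele_idx : List Char) : Int × Int :=
  if allele_idx == ['.'] then st
  else
    let total := st.2 + 1
    if allele_idx == ['0'] then
      -- observed_allele = ref
      (if ref == p2a then (st.1 + 1, total) else (st.1, total))
    else if allele_idx == ['1'] then
      -- observed_allele = alt.split(',')[0], precomputed by the caller
      (if obs1 == p2a.toList then (st.1 + 1, total) else (st.1, total))
    else (st.1, total)

def calculate_hybrid_index (genotype : String) (ref : String) (alt : String) (parent2_allele : String) : Int × Int :=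
  if PySem.Str.startswith genotype "." then (0, 0)
  else
    let alleles := PySem.Chars.splitOn (PySem.Chars.replace genotype.toList ['|'] ['/']) ['/']
    -- alt.split(',')[0]: split by a nonempty separator is never empty, so [0] is the head
    alleles.foldl (chiStep ref parent2_allele ((PySem.Chars.splitOn alt.toList [',']).headD [])) ((0 : Int), (0 : Int))

-- ===== PORT B =====
def calculate_hybrid_index_alt (genotype : String) (ref : String) (alt : String) (parent2_allele : String) : Int × Int :=
  if PySem.Str.startswith genotype "." then (0, 0)
  else
    let alleles := PySem.Chars.splitOn (PySem.Chars.replace genotype.toList ['|'] ['/']) ['/']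
    let total : Int := (alleles.length : Int) - (PySem.List.count alleles ['.'] : Int)
    let p2_count : Int :=
      (PySem.List.count alleles ['0'] : Int) * (if ref == parent2_allele then 1 else 0)
      + (PySem.List.count alleles ['1'] : Int)
        * (if (PySem.Chars.splitOn alt.toList [',']).headD [] == parent2_allele.toList then 1 else 0)
    (p2_count, total)

-- ===== PRECONDITION & SPEC =====
def Spec_calculate_hybrid_index (genotype : String) (ref : String) (alt : String) (parent2_allele : String) (out : Int × Int) : Prop := out = calculate_hybrid_index_alt genotype ref alt parent2_allele
instance (genotype : String) (ref : String) (alt : String) (parent2_allele : String) (out : Int × Int) : Decidable (Spec_calculate_hybrid_index genotype ref alt parent2_allele out) := by unfold Spec_calculate_hybrid_index; infer_instance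

-- ===== CLAIM (what is proved, stated in full; the proofs are below) =====
def Claim_equal_calculate_hybrid_index : Prop := ∀ (genotype : String) (ref : String) (alt : String) (parent2_allele : String), Dom_calculate_hybrid_index genotype ref alt parent2_allele → Spec_calculate_hybrid_index genotype ref alt parent2_allele (calculate_hybrid_index genotype ref alt parent2_allele)

-- ===== LEMMAS AND PROOFS =====
lemma chi_fold (ref p2a : String) (obs1 : List Char) :
    ∀ (l : List (List Char)) (p t : Int),
      l.foldl (chiStep ref p2a obs1) (p, t)
      = (p + (l.count ['0'] : Int) * (if ref == p2a then 1 else 0)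
           + (l.count ['1'] : Int) * (if obs1 == p2a.toList then 1 else 0),
         t + (l.length : Int) - (l.count ['.'] : Int)) := by
  intro l
  induction l with
  | nil => intro p t; simp
  | cons x xs ih =>
    intro p t
    rw [List.foldl_cons]
    by_cases hx : x = ['.']
    · subst hx
      rw [show chiStep ref p2a obs1 (p, t) ['.'] = (p, t) from rfl, ih]
      simp only [List.count_cons, List.length_cons, Prod.mk.injEq]
      push_cast
      refine ⟨by simp; try ring, by simp; try omega⟩
    · by_cases h0 : x = ['0']
      · subst h0
        rw [show chiStep ref p2a obs1 (p, t) ['0']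
              = (if ref == p2a then (p + 1, t + 1) else (p, t + 1)) from rfl]
        by_cases hr : (ref == p2a) = true
        · rw [if_pos hr, ih]
          simp only [List.count_cons, List.length_cons, Prod.mk.injEq, hr]
          push_cast
          refine ⟨by simp; try ring, by simp; try omega⟩
        · rw [if_neg hr, ih]
          simp only [List.count_cons, List.length_cons, Prod.mk.injEq,
            Bool.not_eq_true] at *
          push_cast
          refine ⟨by simp [hr]; try ring, by simp; try omega⟩
      · by_cases h1 : x = ['1']
        · subst h1
          rw [show chiStep ref p2a obs1 (p, t) ['1']
                = (if obs1 == p2a.toList then (p + 1, t + 1) else (p, t + 1)) from rfl]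
          by_cases ho : (obs1 == p2a.toList) = true
          · rw [if_pos ho, ih]
            simp only [List.count_cons, List.length_cons, Prod.mk.injEq, ho]
            push_cast
            refine ⟨by simp; try ring, by simp; try omega⟩
          · rw [if_neg ho, ih]
            simp only [List.count_cons, List.length_cons, Prod.mk.injEq,
              Bool.not_eq_true] at *
            push_cast
            refine ⟨by simp [ho]; try ring, by simp; try omega⟩
        · rw [show chiStep ref p2a obs1 (p, t) x = (p, t + 1) by
            simp [chiStep, hx, h0, h1], ih]
          simp only [List.count_cons, List.length_cons, Prod.mk.injEq]
          push_cast
          refine ⟨by simp [h0, h1]; try ring, by simp [hx]; try omega⟩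

-- ===== VERDICT (by name: the statement is the Claim_ definition above) =====
theorem calculate_hybrid_index_spec : Claim_equal_calculate_hybrid_index := by
  intro genotype ref alt p2a _
  unfold Spec_calculate_hybrid_index calculate_hybrid_index calculate_hybrid_index_alt
  by_cases h : PySem.Str.startswith genotype "."
  · rw [if_pos h, if_pos h]
  · rw [if_neg h, if_neg h]
    simp only [chi_fold, PySem.List.count]
    refine Prod.ext ?_ ?_ <;> push_cast <;> ring
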